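-- pv_equiv track=rewrite | github.com/TimSC/pycrocosm | overpass/views.py | ParseBrackets
-- ===== SOURCE A (Python) =====
-- def ParseBrackets(queryStr):
--
-- 	c = 0
-- 	skipNext = False
-- 	depth = 0
-- 	buff = []
-- 	fragments = []
-- 	while c < len(queryStr):
-- 		if skipNext:
-- 			skipNext = False
-- 			if depth >= 1:
-- 				buff.append(queryStr[c])
-- 		elif queryStr[c] == '\\':
-- 			if depth >= 1:
-- 				buff.append(queryStr[c])
-- 			else:
-- 				skipNext = True
-- 		elif queryStr[c] == '[':
-- 			if depth >= 1:
-- 				buff.append(queryStr[c])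
-- 			depth += 1
-- 		elif queryStr[c] == ']':
-- 			depth -= 1
-- 			if depth >= 1:
-- 				buff.append(queryStr[c])
-- 			elif depth < 0:
-- 				raise ValueError("Unexpected closing bracket")
-- 			else:
-- 				fragments.append("".join(buff))
-- 				buff = []
-- 		else:
-- 			buff.append(queryStr[c])
-- 		c += 1
--
-- 	return fragments
-- ===== SOURCE B (Python) =====
-- def ParseBrackets(queryStr):
-- 	# Outer scanner at top level + inner raw group collector (no flat
-- 	# skipNext/depth state machine).  Top-level ordinary chars accumulate
-- 	# into `pending` and are prefixed to the next fragment; a top-level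
-- 	# backslash consumes itself and the next char; inside a group every
-- 	# char (including backslashes) is collected raw while counting depth.
-- 	fragments = []
-- 	pending = []
-- 	i = 0
-- 	n = len(queryStr)
-- 	while i < n:
-- 		ch = queryStr[i]
-- 		if ch == '\\':
-- 			i += 2
-- 		elif ch == ']':
-- 			raise ValueError("Unexpected closing bracket")
-- 		elif ch == '[':
-- 			i += 1
-- 			depth = 1
-- 			while i < n:
-- 				c2 = queryStr[i]
-- 				if c2 == '[':
-- 					depth += 1
-- 					pending.append(c2)
-- 				elif c2 == ']':
-- 					depth -= 1
-- 					if depth == 0: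
-- 						break
-- 					pending.append(c2)
-- 				else:
-- 					pending.append(c2)
-- 				i += 1
-- 			if depth == 0:
-- 				fragments.append("".join(pending))
-- 				pending = []
-- 			i += 1
-- 		else:
-- 			pending.append(ch)
-- 			i += 1
-- 	return fragments
-- ===== Notes on version B (the rewrite author's own statement) =====
-- stated objective: alternative
-- what changed: Replaced A's single flat state machine (skipNext flag + depth counter threaded through every character) by an outer top-level scanner (escape = skip two chars, close = error) plus an inner raw group collector that counts bracket depth with no escape handling; the skipNext boolean and the top-level depth variable disappear.
-- outside the precondition, e.g. on ParseBrackets(']'): A raises ValueError, B raises ValueError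
import Mathlib
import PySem

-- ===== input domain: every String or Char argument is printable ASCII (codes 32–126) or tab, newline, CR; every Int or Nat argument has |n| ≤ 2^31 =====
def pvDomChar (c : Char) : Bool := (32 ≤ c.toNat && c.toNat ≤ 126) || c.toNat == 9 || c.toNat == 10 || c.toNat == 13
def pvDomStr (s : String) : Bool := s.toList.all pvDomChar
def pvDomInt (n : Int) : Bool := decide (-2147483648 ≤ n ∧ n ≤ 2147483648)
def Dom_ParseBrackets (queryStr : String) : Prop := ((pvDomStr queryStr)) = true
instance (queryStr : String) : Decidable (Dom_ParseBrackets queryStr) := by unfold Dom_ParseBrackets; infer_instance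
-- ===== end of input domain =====

-- B replaces A's flat skipNext/depth state machine by an outer top-level scanner plus an
-- inner raw group collector (objective: alternative decomposition, same cost).

-- ===== PORT A =====
-- flat state machine: (skipNext, depth, buff, fragments); on the unmatched-']' raise
-- (excluded by Pre_) the port just returns the fragments accumulated so far.
def goA : List Char → Bool → Int → List Char → List String → List String
  | [], _, _, _, frags => frags
  | ch :: rest, skip, depth, buff, frags =>
    if skip then
      goA rest false depth (if 1 ≤ depth then buff ++ [ch] else buff) frags
    else if ch = '\\' then
      if 1 ≤ depth then goA rest false depth (buff ++ [ch]) frags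
      else goA rest true depth buff frags
    else if ch = '[' then
      goA rest false (depth + 1) (if 1 ≤ depth then buff ++ [ch] else buff) frags
    else if ch = ']' then
      if 1 ≤ depth - 1 then goA rest false (depth - 1) (buff ++ [ch]) frags
      else if depth - 1 < 0 then frags  -- Python: raise ValueError (outside Pre_)
      else goA rest false (depth - 1) [] (frags ++ [String.mk buff])
    else
      goA rest false depth (buff ++ [ch]) frags

def ParseBrackets (queryStr : String) : List String :=
  goA queryStr.toList false 0 [] []

-- ===== PORT B =====
-- inner raw group collector: counts depth, no escape handling; returns the remaining
-- input and the collected buffer when depth returns to 0, none if the group is unclosed.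
def innerB : List Char → Int → List Char → Option (List Char × List Char)
  | [], _, _ => none
  | c :: rest, d, buf =>
    if c = '[' then innerB rest (d + 1) (buf ++ [c])
    else if c = ']' then
      if d = 1 then some (rest, buf) else innerB rest (d - 1) (buf ++ [c])
    else innerB rest d (buf ++ [c])

theorem innerB_length (cs : List Char) (d : Int) (buf rest' buf' : List Char)
    (h : innerB cs d buf = some (rest', buf')) : rest'.length < cs.length := by
  induction cs generalizing d buf with
  | nil => simp [innerB] at h
  | cons c rest ih =>
    simp only [innerB] at h
    split_ifs at h with h1 h2 h3
    · exact Nat.lt_succ_of_lt (ih _ _ h)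
    · cases h; simp
    · exact Nat.lt_succ_of_lt (ih _ _ h)
    · exact Nat.lt_succ_of_lt (ih _ _ h)

-- outer top-level scanner: '\' consumes two chars, ']' is the error case
-- (port returns the fragments so far; outside Pre_), '[' hands over to innerB.
def outerB : List Char → List Char → List String → List String
  | [], _, frags => frags
  | c :: rest, pending, frags =>
    if c = '\\' then outerB (rest.drop 1) pending frags
    else if c = ']' then frags  -- Python: raise ValueError (outside Pre_)
    else if c = '[' then
      match h : innerB rest 1 pending with
      | none => frags
      | some (rest', buf) =>
        have : rest'.length < rest.length := innerB_length rest 1 pending rest' buf h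
        outerB rest' [] (frags ++ [String.mk buf])
    else outerB rest (pending ++ [c]) frags
  termination_by cs _ _ => cs.length
  decreasing_by
  · simp only [List.length_cons]
    simp only [List.length_drop]
    omega
  · simp only [List.length_cons]; omega
  · simp

def ParseBrackets_alt (queryStr : String) : List String :=
  outerB queryStr.toList [] []

-- ===== PRECONDITION & SPEC =====
-- Pre_ excludes exactly the inputs with an unmatched top-level ']' (after escape
-- skipping), on which Python A raises ValueError("Unexpected closing bracket").
def noUnexpectedClose : List Char → Int → Bool → Bool
  | [], _, _ => true
  | c :: rest, d, skip =>
    if skip then noUnexpectedClose rest d false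
    else if d = 0 then
      if c = '\\' then noUnexpectedClose rest 0 true
      else if c = ']' then false
      else if c = '[' then noUnexpectedClose rest 1 false
      else noUnexpectedClose rest 0 false
    else
      if c = '[' then noUnexpectedClose rest (d + 1) false
      else if c = ']' then noUnexpectedClose rest (d - 1) false
      else noUnexpectedClose rest d false

def Pre_ParseBrackets (queryStr : String) : Prop :=
  noUnexpectedClose queryStr.toList 0 false = true
instance (queryStr : String) : Decidable (Pre_ParseBrackets queryStr) := by
  unfold Pre_ParseBrackets; infer_instance

def pvWitness_ParseBrackets : String := "a[b[c]d]e[f]"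

def Spec_ParseBrackets (queryStr : String) (out : List String) : Prop :=
  out = ParseBrackets_alt queryStr
instance (queryStr : String) (out : List String) : Decidable (Spec_ParseBrackets queryStr out) := by
  unfold Spec_ParseBrackets; infer_instance

-- ===== CLAIM (what is proved, stated in full; the proofs are below) =====
def Claim_equal_ParseBrackets : Prop := ∀ (queryStr : String), Dom_ParseBrackets queryStr → Pre_ParseBrackets queryStr → Spec_ParseBrackets queryStr (ParseBrackets queryStr)

-- ===== LEMMAS AND PROOFS =====

-- Inside a group (depth ≥ 1, skipNext never set), A's machine and B's inner collector agree.
theorem goA_inner (cs : List Char) (d : Int) (buf : List Char) (frags : List String)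
    (hd : 1 ≤ d) :
    goA cs false d buf frags =
      (match innerB cs d buf with
       | none => frags
       | some (rest', buf') => goA rest' false 0 [] (frags ++ [String.mk buf'])) := by
  induction cs generalizing d buf with
  | nil => simp [goA, innerB]
  | cons c rest ih =>
    by_cases hb : c = '\\'
    · have hne1 : c ≠ '[' := by simp [hb]
      have hne2 : c ≠ ']' := by simp [hb]
      simp only [goA, innerB, if_neg (by simp : ¬False), hb, if_pos hd]
      simp only [if_neg (by decide : ¬('\\' = '[')), if_neg (by decide : ¬('\\' = ']'))]
      exact ih _ _ hd
    · by_cases ho : c = '['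
      · simp only [goA, innerB, ho, if_neg (by decide : ¬('[' = '\\')), if_pos rfl,
          if_pos hd, reduceIte]
        exact ih _ _ (by omega)
      · by_cases hc : c = ']'
        · by_cases h1 : d = 1
          · simp [goA, innerB, hc, h1]
          · have h2 : (1:Int) ≤ d - 1 := by omega
            simp only [goA, innerB, hc, if_neg (by decide : ¬(']' = '\\')),
              if_neg (by decide : ¬(']' = '[')), if_pos rfl, if_pos h2, if_neg h1, reduceIte]
            exact ih _ _ h2
        · simp only [goA, innerB, if_neg hb, if_neg ho, if_neg hc, reduceIte]
          exact ih _ _ hd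

-- At top level, A's machine equals B's outer scanner whenever no unmatched ']' occurs.
theorem goA_outer (n : Nat) (cs : List Char) (pending : List Char) (frags : List String)
    (hn : cs.length ≤ n) (hpre : noUnexpectedClose cs 0 false = true) :
    goA cs false 0 pending frags = outerB cs pending frags := by
  induction n generalizing cs pending frags with
  | zero =>
    have : cs = [] := by
      cases cs with
      | nil => rfl
      | cons a b => simp at hn
    subst this; simp [goA, outerB]
  | succ n ih =>
    cases cs with
    | nil => simp [goA, outerB]
    | cons c rest =>
      simp only [List.length_cons, Nat.succ_le_succ_iff] at hn
      by_cases hb : c = '\\'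
      · subst hb
        simp only [noUnexpectedClose, reduceIte] at hpre
        simp only [goA, outerB, reduceIte]
        cases rest with
        | nil => simp [goA, outerB]
        | cons x rest2 =>
          simp only [noUnexpectedClose, reduceIte] at hpre
          simp only [List.drop_succ_cons, List.drop_zero]
          -- skipNext step at depth 0: char x is consumed, buffer unchanged
          have hstep : goA (x :: rest2) true 0 pending frags =
              goA rest2 false 0 pending frags := by
            simp [goA]
          rw [hstep]
          exact ih rest2 pending frags (by simp at hn; omega) hpre
      · by_cases hc : c = ']'
        · subst hc
          simp [noUnexpectedClose] at hpre
        · by_cases ho : c = '['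
          · subst ho
            simp only [noUnexpectedClose, if_neg (by decide : ¬('[' = '\\')),
              if_neg (by decide : ¬('[' = ']')), if_pos rfl, reduceIte] at hpre
            simp only [goA, outerB, if_neg hb, if_neg hc, reduceIte]
            norm_num
            rw [goA_inner rest 1 pending frags (le_refl 1)]
            cases hinner : innerB rest 1 pending with
            | none => simp
            | some p =>
              obtain ⟨rest', buf'⟩ := p
              have hlen := innerB_length rest 1 pending rest' buf' hinner
              have hpre' : noUnexpectedClose rest' 0 false = true := by
                have key : ∀ (m : Nat) (cs : List Char) (d : Int) (buf rest' buf' : List Char),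
                    cs.length ≤ m → 1 ≤ d → innerB cs d buf = some (rest', buf') →
                    noUnexpectedClose cs d false = noUnexpectedClose rest' 0 false := by
                  intro m
                  induction m with
                  | zero =>
                    intro cs d buf r b hm hd h
                    cases cs with
                    | nil => simp [innerB] at h
                    | cons a t => simp at hm
                  | succ m ihm =>
                    intro cs d buf r b hm hd h
                    cases cs with
                    | nil => simp [innerB] at h
                    | cons a t =>
                      simp only [List.length_cons, Nat.succ_le_succ_iff] at hm
                      have hd0 : ¬(d = 0) := by omega
                      by_cases ha : a = '['
                      · simp only [innerB, ha, reduceIte] at h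
                        simp only [noUnexpectedClose, ha, if_neg hd0, reduceIte]
                        exact ihm t (d+1) (buf ++ ['[']) r b hm (by omega) h
                      · by_cases ha2 : a = ']'
                        · subst ha2
                          by_cases h1 : d = 1
                          · subst h1
                            simp [innerB] at h
                            rw [h.1]
                            simp [noUnexpectedClose]
                          · simp only [innerB, h1, reduceIte] at h
                            simp only [noUnexpectedClose, if_neg hd0, reduceIte]
                            exact ihm t (d-1) (buf ++ [']']) r b hm (by omega) h
                        · simp only [innerB, ha, ha2, reduceIte] at h
                          simp only [noUnexpectedClose, if_neg hd0, if_neg ha, if_neg ha2,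
                            reduceIte]
                          exact ihm t d (buf ++ [a]) r b hm hd h
                rw [← key rest.length rest 1 pending rest' buf' (le_refl _) (le_refl 1) hinner]
                exact hpre
              simp only [hinner]
              exact ih rest' [] (frags ++ [String.mk buf']) (by omega) hpre'
          · simp only [noUnexpectedClose, if_neg hb, if_neg hc, if_neg ho, reduceIte] at hpre
            simp only [goA, outerB, if_neg hb, if_neg hc, if_neg ho, reduceIte]
            exact ih rest (pending ++ [c]) frags hn hpre

-- ===== VERDICT (by name: the statement is the Claim_ definition above) =====
theorem ParseBrackets_spec : Claim_equal_ParseBrackets := by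
  intro s _ hpre
  unfold Spec_ParseBrackets ParseBrackets ParseBrackets_alt
  exact goA_outer s.toList.length s.toList [] [] (le_refl _) hpre
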